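-- pv_equiv track=rewrite | github.com/ClementBraunNSI/nsi-courses | interro_2025_2026/B3/B3 - Braun (2025-2027)-DS Python G2-4830/Killian Midavaine_24197_assignsubmission_file/DS python.py | identifiant_renard_valide
-- ===== SOURCE A (Python) =====
-- def identifiant_renard_valide(code: str) -> bool:
--     if len(code) < 7:
--         return True
--     alphabet = "abcdefghijklmnopqrstuvwxyzABCDEFGHIJKLMNOPQRSTUVWXYZ"
--     digits = "0123456789"
--     a_lettre = False
--     a_chiffre = False
--     for c in code:
--         if c in alphabet:
--             a_lettre = True
--         if c in digits:
--             a_chiffre = True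
--     if a_lettre and a_chiffre:
--         return True
--     return False
-- ===== SOURCE B (Python) =====
-- def identifiant_renard_valide(code: str) -> bool:
--     if len(code) < 7:
--         return True
--     alphabet = "abcdefghijklmnopqrstuvwxyzABCDEFGHIJKLMNOPQRSTUVWXYZ"
--     digits = "0123456789"
--     # Inverted traversal: iterate over the fixed alphabet/digit characters
--     # and ask whether each occurs in the code (short-circuiting).
--     return any(ch in code for ch in alphabet) and any(d in code for d in digits)
-- ===== Notes on version B (the rewrite author's own statement) =====
-- stated objective: idiomatic
-- what changed: Inverts the traversal: instead of one full pass over the code accumulating letter/digit flags, B iterates over the fixed 52-letter and 10-digit strings and asks whether each character occurs in the code, short-circuiting at the first hit.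
import Mathlib
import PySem

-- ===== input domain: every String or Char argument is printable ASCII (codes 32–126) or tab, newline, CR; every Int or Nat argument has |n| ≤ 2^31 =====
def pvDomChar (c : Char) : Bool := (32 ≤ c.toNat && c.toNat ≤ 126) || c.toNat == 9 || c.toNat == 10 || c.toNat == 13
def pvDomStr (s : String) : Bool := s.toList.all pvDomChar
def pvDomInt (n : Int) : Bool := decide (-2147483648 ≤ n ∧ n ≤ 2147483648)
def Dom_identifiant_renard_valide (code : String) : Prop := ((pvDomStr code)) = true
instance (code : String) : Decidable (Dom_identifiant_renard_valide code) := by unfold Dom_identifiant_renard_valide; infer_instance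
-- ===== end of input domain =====

-- B inverts the traversal: it loops over the fixed alphabet/digit strings asking whether each occurs in the code, instead of A's single flag-accumulating pass over the code (idiomatic rewrite); proved equal to A on all strings.


def pvAlphabet : List Char := "abcdefghijklmnopqrstuvwxyzABCDEFGHIJKLMNOPQRSTUVWXYZ".toList
def pvDigits : List Char := "0123456789".toList

-- ===== PORT A =====
-- A: early True for short codes, then one scan over the code accumulating two flags.
def identifiant_renard_valide (code : String) : Bool :=
  if code.toList.length < 7 then true
  else
    let st := code.toList.foldl (fun (st : Bool × Bool) c =>
      (if pvAlphabet.contains c then true else st.1,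
       if pvDigits.contains c then true else st.2)) (false, false)
    if st.1 && st.2 then true else false

-- ===== PORT B =====
-- B: loop over the fixed alphabet and digit strings, asking whether each character occurs in the code.
def identifiant_renard_valide_alt (code : String) : Bool :=
  if code.toList.length < 7 then true
  else
    pvAlphabet.any (fun ch => code.toList.contains ch) &&
    pvDigits.any (fun d => code.toList.contains d)

-- ===== PRECONDITION & SPEC =====
def Spec_identifiant_renard_valide (code : String) (out : Bool) : Prop := out = identifiant_renard_valide_alt code
instance (code : String) (out : Bool) : Decidable (Spec_identifiant_renard_valide code out) := by unfold Spec_identifiant_renard_valide; infer_instance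

-- ===== CLAIM (what is proved, stated in full; the proofs are below) =====
def Claim_equal_identifiant_renard_valide : Prop := ∀ (code : String), Dom_identifiant_renard_valide code → Spec_identifiant_renard_valide code (identifiant_renard_valide code)

-- ===== LEMMAS AND PROOFS =====

-- A's fold computes the two 'any' predicates.
theorem pv_fold_flags (l : List Char) (a b : Bool) :
    l.foldl (fun (st : Bool × Bool) c =>
      (if pvAlphabet.contains c then true else st.1,
       if pvDigits.contains c then true else st.2)) (a, b)
    = (a || l.any pvAlphabet.contains, b || l.any pvDigits.contains) := by
  induction l generalizing a b with
  | nil => simp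
  | cons c t ih =>
    simp only [List.foldl_cons, List.any_cons, ih]
    cases hc : pvAlphabet.contains c <;> cases hd : pvDigits.contains c <;>
      simp

-- Scanning l for a member of t equals scanning t for a member of l (both mean a common element exists).
theorem pv_any_swap (l t : List Char) :
    (l.any t.contains) = (t.any (fun c => l.contains c)) := by
  rw [Bool.eq_iff_iff]
  simp only [List.any_eq_true, List.contains_iff_mem]
  exact ⟨fun ⟨x, h1, h2⟩ => ⟨x, h2, h1⟩, fun ⟨x, h1, h2⟩ => ⟨x, h2, h1⟩⟩

-- ===== VERDICT (by name: the statement is the Claim_ definition above) =====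
theorem identifiant_renard_valide_spec : Claim_equal_identifiant_renard_valide := by
  intro code _
  unfold Spec_identifiant_renard_valide identifiant_renard_valide identifiant_renard_valide_alt
  by_cases h : code.toList.length < 7
  · rw [if_pos h, if_pos h]
  · rw [if_neg h, if_neg h]
    simp only [pv_fold_flags, Bool.false_or]
    rw [← pv_any_swap code.toList pvAlphabet, ← pv_any_swap code.toList pvDigits]
    cases hb : (code.toList.any pvAlphabet.contains && code.toList.any pvDigits.contains) <;>
      simp
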